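-- pv_equiv track=rewrite | github.com/gukihuman/algorithms-python-hiryanov | Lecture_03_numbers_assignment/L03_task_D_square_sequence.py | square_sequence
-- ===== SOURCE A (Python) =====
-- def square_sequence(max_square):
-- 	"""
-- 	Returns a sequence of squares of integers in ascending order up to
-- 	the case where the square is greater or equal to the maximum square.
-- 	The maximum square is getting from input of the function.
-- 	The maximum square must be greater then zero.
--
-- 	:param max_square: a number of the maximum square
-- 	:return: the sequence of squares of integers
-- 	"""
--
-- 	# Creates a list for squares.
-- 	squares = []
--
-- 	# Creates a variable for the first square.
-- 	square = 1
--
-- 	# Creates a variable for the first integer.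
-- 	integer = 1
--
-- 	# Starts a cycle of creating a sequence of squares while the square is
-- 	# lesser or equal to the max_square.
-- 	while square <= max_square:
--
-- 		# Appends the square to the square-list.
-- 		squares.append(square)
--
-- 		# Sets a next integer.
-- 		integer += 1
--
-- 		# Sets a square of the integer.
-- 		square = integer ** 2
--
-- 	# Returns the sequence of the squares.
-- 	return squares
-- ===== SOURCE B (Python) =====
-- import math
--
-- def square_sequence(max_square):
--     n = math.isqrt(max_square) if max_square > 0 else 0
--     return [i * i for i in range(1, n + 1)]
-- ===== Notes on version B (the rewrite author's own statement) =====
-- stated objective: simpler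
-- what changed: Replaces the accumulate-and-increment while loop with a closed-form bound: compute n = isqrt(max_square) once and build [i*i for i in range(1, n+1)].
import Mathlib
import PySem

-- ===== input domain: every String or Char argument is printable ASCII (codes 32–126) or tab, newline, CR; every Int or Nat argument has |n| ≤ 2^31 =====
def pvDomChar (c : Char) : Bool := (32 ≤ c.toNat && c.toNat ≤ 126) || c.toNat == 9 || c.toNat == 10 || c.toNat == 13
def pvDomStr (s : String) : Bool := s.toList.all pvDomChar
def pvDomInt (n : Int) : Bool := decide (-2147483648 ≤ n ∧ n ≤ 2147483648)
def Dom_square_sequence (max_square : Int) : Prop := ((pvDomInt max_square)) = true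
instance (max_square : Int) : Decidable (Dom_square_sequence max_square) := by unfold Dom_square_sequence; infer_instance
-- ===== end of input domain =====

-- B replaces A's accumulate-and-increment while loop with a closed-form isqrt bound plus a comprehension (simpler: two lines, no mutable loop state).

-- ===== PORT A =====
-- while loop of A: appends integer**2 and increments integer while the square is <= max_square
def sqLoopA (max_square integer : Int) (squares : List Int) : List Int :=
  if _h : integer * integer ≤ max_square then
    sqLoopA max_square (integer + 1) (squares ++ [integer * integer])
  else squares
termination_by (max_square + 1 - integer).toNat
decreasing_by
  have hle : integer ≤ max_square := by nlinarith [sq_nonneg integer, sq_nonneg (integer - 1)]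
  omega

def square_sequence (max_square : Int) : List Int := sqLoopA max_square 1 []

-- ===== PORT B =====
-- Source B: n = math.isqrt(max_square) if max_square > 0 else 0; [i*i for i in range(1, n+1)]
def square_sequence_alt (max_square : Int) : List Int :=
  let n : Int := if max_square > 0 then (Nat.sqrt max_square.toNat : Int) else 0
  (PySem.List.pyRange 1 (n + 1) 1).map (fun i => i * i)

-- ===== PRECONDITION & SPEC =====
def Spec_square_sequence (max_square : Int) (out : List Int) : Prop := out = square_sequence_alt max_square
instance (max_square : Int) (out : List Int) : Decidable (Spec_square_sequence max_square out) := by unfold Spec_square_sequence; infer_instance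

-- ===== CLAIM (what is proved, stated in full; the proofs are below) =====
def Claim_equal_square_sequence : Prop := ∀ (max_square : Int), Dom_square_sequence max_square → Spec_square_sequence max_square (square_sequence max_square)

-- ===== LEMMAS AND PROOFS =====

-- ===== VERDICT (by name: the statement is the Claim_ definition above) =====
-- characterisation of A's loop: from counter k ≥ 1 it appends the squares of k..isqrt(max_square)
theorem sqLoopA_eq (max_square : Int) :
    ∀ k acc, 1 ≤ k →
      sqLoopA max_square k acc =
        acc ++ (PySem.List.pyRange k
          ((if max_square > 0 then (Nat.sqrt max_square.toNat : Int) else 0) + 1) 1).map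
          (fun i => i * i) := by
  intro k acc hk
  induction k, acc using sqLoopA.induct max_square with
  | case1 k acc h ih =>
    rw [sqLoopA]
    simp only [dite_true, h]
    have hpos : max_square > 0 := by nlinarith
    have hkt : ((k.toNat : Nat) : Int) = k := by omega
    have hcast : ((max_square.toNat : Nat) : Int) = max_square := by omega
    have hsqn : k.toNat * k.toNat ≤ max_square.toNat := by
      have : ((k.toNat * k.toNat : Nat) : Int) ≤ ((max_square.toNat : Nat) : Int) := by
        push_cast
        rw [hkt, hcast]
        exact h
      exact_mod_cast this
    have hks : k ≤ (Nat.sqrt max_square.toNat : Int) := by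
      have := Nat.le_sqrt.mpr hsqn
      omega
    rw [PySem.List.pyRange_one_cons (show k < (if max_square > 0 then (Nat.sqrt max_square.toNat : Int) else 0) + 1 by simp only [hpos, if_pos]; omega)]
    rw [ih (by omega)]
    simp
  | case2 k acc h =>
    rw [sqLoopA]
    simp only [h, dite_false]
    have hstop : (if max_square > 0 then (Nat.sqrt max_square.toNat : Int) else 0) + 1 ≤ k := by
      split
      · next hpos =>
        by_contra hc
        have hks : k.toNat ≤ Nat.sqrt max_square.toNat := by omega
        have hsqn : k.toNat * k.toNat ≤ max_square.toNat := Nat.le_sqrt.mp hks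
        have hkt : ((k.toNat : Nat) : Int) = k := by omega
        have hcast : ((max_square.toNat : Nat) : Int) = max_square := by omega
        have : k * k ≤ max_square := by
          calc k * k = ((k.toNat * k.toNat : Nat) : Int) := by push_cast; rw [hkt]
            _ ≤ ((max_square.toNat : Nat) : Int) := by exact_mod_cast hsqn
            _ = max_square := hcast
        exact h this
      · omega
    rw [PySem.List.pyRange_one_eq_nil hstop]
    simp

theorem square_sequence_spec : Claim_equal_square_sequence := by
  intro max_square _
  unfold Spec_square_sequence square_sequence square_sequence_alt
  rw [sqLoopA_eq max_square 1 [] le_rfl]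
  simp
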